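-- pv_equiv track=rewrite | github.com/LadnerLab/ProteinOligoLibrary | protein_oligo_library.py | min_concurrent_chars
-- ===== SOURCE A (Python) =====
-- def min_concurrent_chars( test_string, delimeter_char ):
--     """
--         Finds the minimum number of concurrent non-delimiter char in
--         test_string
--
--         Params:
--           test_string- string to search
--           delimeter_char- character to reset the count
--         Returns:
--           integer value, the smallest amount of concurrent characters
--                between delimeter character
--     """
--
--     split_string = test_string.split( delimeter_char )
--     min_length = len( split_string[ 0 ] )
--
--     for substring in split_string[ 1: ]:
--         current_length = len( substring )
--         if current_length > 0 and current_length < min_length: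
--             min_length = current_length
--
--     return min_length
-- ===== SOURCE B (Python) =====
-- def min_concurrent_chars(test_string, delimeter_char):
--     if not delimeter_char:
--         raise ValueError("empty separator")
--     k = len(delimeter_char)
--     min_length = 0
--     first = True
--     run = 0
--     i = 0
--     n = len(test_string)
--     while i < n:
--         if test_string.startswith(delimeter_char, i):
--             if first:
--                 min_length = run
--                 first = False
--             elif 0 < run < min_length:
--                 min_length = run
--             run = 0
--             i += k
--         else:
--             run += 1
--             i += 1
--     if first:
--         return run
--     if 0 < run < min_length:
--         return run
--     return min_length
-- ===== Notes on version B (the rewrite author's own statement) =====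
-- stated objective: alternative
-- what changed: B replaces A's split-into-a-substring-list-then-minimise with a single character-by-character scan that streams a run counter, a first-segment flag and the running minimum, never materialising the substrings.
import Mathlib
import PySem

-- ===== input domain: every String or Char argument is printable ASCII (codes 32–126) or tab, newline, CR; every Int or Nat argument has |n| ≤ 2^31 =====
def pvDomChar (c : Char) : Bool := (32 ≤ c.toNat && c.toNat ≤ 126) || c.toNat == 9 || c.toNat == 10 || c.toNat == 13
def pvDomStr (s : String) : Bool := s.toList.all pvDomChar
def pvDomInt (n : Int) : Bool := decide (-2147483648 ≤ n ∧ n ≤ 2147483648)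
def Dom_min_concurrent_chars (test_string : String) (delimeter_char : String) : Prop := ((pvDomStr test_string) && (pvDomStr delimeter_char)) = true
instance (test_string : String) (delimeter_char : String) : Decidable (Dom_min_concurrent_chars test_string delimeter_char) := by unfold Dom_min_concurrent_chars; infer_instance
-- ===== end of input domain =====

-- B replaces A's split-into-substrings-then-minimise with a single streaming
-- character scan keeping only a run counter, a first-segment flag and the
-- current minimum (objective: alternative — no substring list is built).

-- ===== PORT A =====
-- A: split the string on the delimiter, take the first piece's length, then
-- fold over the remaining pieces keeping the smallest positive length seen.
def min_concurrent_chars (test_string : String) (delimeter_char : String) : Int :=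
  match PySem.Str.split? test_string delimeter_char with
  | none => 0  -- ValueError on empty separator: excluded by Pre_
  | some split_string =>
    match PySem.List.pyGet? split_string 0 with
    | none => 0  -- IndexError: unreachable, split always returns at least one piece
    | some s0 =>
      let min_length : Int := PySem.Str.len s0
      (PySem.List.slice split_string (some 1) none).foldl
        (fun min_length substring =>
          let current_length : Int := PySem.Str.len substring
          if 0 < current_length ∧ current_length < min_length then current_length
          else min_length)
        min_length

-- ===== PORT B =====
-- finalize the run that just ended (mirror of Source B's delimiter-hit / end-of-string code)
def pvFin (first : Bool) (run min_length : Int) : Int :=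
  if first then run
  else if 0 < run ∧ run < min_length then run else min_length

-- Source B's while-loop: scan the remaining characters; fuel = number of characters
-- left (the loop consumes at least one character per iteration when sep ≠ []).
def pvScan (sep : List Char) (fuel : Nat) (cs : List Char)
    (first : Bool) (run min_length : Int) : Int :=
  match fuel, cs with
  | _, [] => pvFin first run min_length
  | 0, _ :: _ => pvFin first run min_length  -- fuel guard, never reached when sep ≠ []
  | Nat.succ f, c :: rest =>
    if sep.isPrefixOf (c :: rest) then
      pvScan sep f (List.drop sep.length (c :: rest)) false 0 (pvFin first run min_length)
    else
      pvScan sep f rest first (run + 1) min_length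

def min_concurrent_chars_alt (test_string : String) (delimeter_char : String) : Int :=
  if delimeter_char.toList = [] then 0  -- Source B raises ValueError here: excluded by Pre_
  else pvScan delimeter_char.toList test_string.toList.length test_string.toList true 0 0

-- ===== PRECONDITION & SPEC =====
-- Pre_ excludes only the empty delimiter, on which Python's str.split (hence A) raises ValueError.
def Pre_min_concurrent_chars (test_string : String) (delimeter_char : String) : Prop :=
  delimeter_char ≠ ""
instance (test_string : String) (delimeter_char : String) : Decidable (Pre_min_concurrent_chars test_string delimeter_char) := by unfold Pre_min_concurrent_chars; infer_instance

def pvWitness_min_concurrent_chars : String × String := ("ab,c,,defg", ",")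

def Spec_min_concurrent_chars (test_string : String) (delimeter_char : String) (out : Int) : Prop := out = min_concurrent_chars_alt test_string delimeter_char
instance (test_string : String) (delimeter_char : String) (out : Int) : Decidable (Spec_min_concurrent_chars test_string delimeter_char out) := by unfold Spec_min_concurrent_chars; infer_instance

-- ===== CLAIM (what is proved, stated in full; the proofs are below) =====
def Claim_equal_min_concurrent_chars : Prop := ∀ (test_string : String) (delimeter_char : String), Dom_min_concurrent_chars test_string delimeter_char → Pre_min_concurrent_chars test_string delimeter_char → Spec_min_concurrent_chars test_string delimeter_char (min_concurrent_chars test_string delimeter_char)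

-- ===== LEMMAS AND PROOFS =====

-- A's fold step
def pvStep (m l : Int) : Int := if 0 < l ∧ l < m then l else m

-- the accumulator of splitOn.go distributes out
lemma go_acc (sep : List Char) : ∀ (fuel : Nat) (l cur : List Char) (acc : List (List Char)),
    PySem.Chars.splitOn.go sep fuel l cur acc
      = acc.reverse ++ PySem.Chars.splitOn.go sep fuel l cur [] := by
  intro fuel
  induction fuel with
  | zero => intro l cur acc; simp [PySem.Chars.splitOn.go]
  | succ f ih =>
    intro l cur acc
    cases l with
    | nil => simp [PySem.Chars.splitOn.go]
    | cons c rest =>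
      simp only [PySem.Chars.splitOn.go]
      split_ifs with h
      · rw [ih _ _ (cur.reverse :: acc), ih _ _ [cur.reverse]]
        simp
      · exact ih _ _ acc

-- the current-piece accumulator prepends onto the head of the result
lemma go_cur (sep : List Char) : ∀ (fuel : Nat) (l cur : List Char),
    PySem.Chars.splitOn.go sep fuel l cur []
      = (cur.reverse ++ (PySem.Chars.splitOn.go sep fuel l [] []).headD [])
          :: (PySem.Chars.splitOn.go sep fuel l [] []).tail := by
  intro fuel
  induction fuel with
  | zero => intro l cur; simp [PySem.Chars.splitOn.go]
  | succ f ih =>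
    intro l cur
    cases l with
    | nil => simp [PySem.Chars.splitOn.go]
    | cons c rest =>
      simp only [PySem.Chars.splitOn.go]
      split_ifs with h
      · simp only [List.reverse_nil]
        rw [go_acc sep f _ _ [cur.reverse], go_acc sep f _ _ [[]]]
        simp
      · rw [ih rest (c :: cur), ih rest [c]]
        simp

lemma go_nil (sep : List Char) (fuel : Nat) :
    PySem.Chars.splitOn.go sep fuel [] [] [] = [[]] := by
  cases fuel <;> simp [PySem.Chars.splitOn.go]

lemma go_cons_prefix (sep : List Char) (f : Nat) (c : Char) (rest : List Char)
    (h : sep.isPrefixOf (c :: rest) = true) :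
    PySem.Chars.splitOn.go sep (f + 1) (c :: rest) [] []
      = [] :: PySem.Chars.splitOn.go sep f (List.drop sep.length (c :: rest)) [] [] := by
  simp only [PySem.Chars.splitOn.go, h, if_pos, List.reverse_nil]
  rw [go_acc sep f _ _ [[]]]
  simp

lemma go_cons_nonprefix (sep : List Char) (f : Nat) (c : Char) (rest : List Char)
    (h : ¬ sep.isPrefixOf (c :: rest) = true) :
    PySem.Chars.splitOn.go sep (f + 1) (c :: rest) [] []
      = (c :: (PySem.Chars.splitOn.go sep f rest [] []).headD [])
          :: (PySem.Chars.splitOn.go sep f rest [] []).tail := by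
  simp only [PySem.Chars.splitOn.go, h, if_neg, Bool.false_eq_true, not_false_iff]
  rw [go_cur sep f rest [c]]
  simp

-- the streaming scan computes A's fold over the piece lengths of the remaining string
lemma scan_eq_fold (sep : List Char) (hsep : sep ≠ []) :
    ∀ (f : Nat) (l : List Char) (fuel2 : Nat) (first : Bool) (run min_length : Int),
      l.length < f → l.length ≤ fuel2 →
      pvScan sep fuel2 l first run min_length
        = ((PySem.Chars.splitOn.go sep f l [] []).tail.map
            (fun p => (p.length : Int))).foldl pvStep
            (pvFin first
              (run + ((PySem.Chars.splitOn.go sep f l [] []).headD []).length) min_length) := by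
  intro f
  induction f with
  | zero => intro l fuel2 first run min_length hf; omega
  | succ f ih =>
    intro l fuel2 first run min_length hf h2
    cases l with
    | nil =>
      rw [go_nil]
      cases fuel2 <;> simp [pvScan]
    | cons c rest =>
      have hsl : 1 ≤ sep.length := by
        cases sep with
        | nil => exact absurd rfl hsep
        | cons a b => simp
      obtain ⟨g, rfl⟩ : ∃ g, fuel2 = g + 1 := by
        cases fuel2 with
        | zero => simp at h2
        | succ g => exact ⟨g, rfl⟩
      by_cases h : sep.isPrefixOf (c :: rest) = true
      · rw [go_cons_prefix sep f c rest h]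
        simp only [pvScan, h, if_pos]
        rw [ih (List.drop sep.length (c :: rest)) g false 0 (pvFin first run min_length)
            (by simp only [List.length_cons] at hf h2
                simp only [List.length_drop, List.length_cons]; omega)
            (by simp only [List.length_cons] at hf h2
                simp only [List.length_drop, List.length_cons]; omega)]
        simp only [List.headD_cons, List.tail_cons, List.length_nil]
        have : pvFin false (0 + ((PySem.Chars.splitOn.go sep f (List.drop sep.length (c :: rest)) [] []).headD []).length) (pvFin first run min_length)
            = pvStep (pvFin first (run + 0) min_length) (((PySem.Chars.splitOn.go sep f (List.drop sep.length (c :: rest)) [] []).headD []).length : Int) := by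
          simp [pvFin, pvStep]
        rw [this]
        cases hgo : PySem.Chars.splitOn.go sep f (List.drop sep.length (c :: rest)) [] [] with
        | nil => simp [pvStep]
        | cons p ps => simp [List.foldl_cons]
      · rw [go_cons_nonprefix sep f c rest h]
        simp only [pvScan, h, if_neg, Bool.false_eq_true, not_false_iff]
        rw [ih rest g first (run + 1) min_length (by simp at hf ⊢; omega) (by simp at h2 ⊢; omega)]
        simp only [List.headD_cons, List.tail_cons, List.length_cons]
        have harg : run + 1 + (((PySem.Chars.splitOn.go sep f rest [] []).headD []).length : Int)
            = run + ((((PySem.Chars.splitOn.go sep f rest [] []).headD []).length + 1 : Nat) : Int) := by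
          push_cast; ring
        rw [harg]

-- ===== VERDICT (by name: the statement is the Claim_ definition above) =====
theorem min_concurrent_chars_spec : Claim_equal_min_concurrent_chars := by
  intro s sep _ hpre
  unfold Spec_min_concurrent_chars min_concurrent_chars min_concurrent_chars_alt
  have hsep : sep.toList ≠ [] := fun h => hpre (by rwa [String.toList_eq_nil_iff] at h)
  have hsplit : PySem.Str.split? s sep
      = some ((PySem.Chars.splitOn s.toList sep.toList).map String.ofList) := by
    simp [PySem.Str.split?, PySem.Chars.split?, List.isEmpty_iff, hsep]
  obtain ⟨p, ps, hq⟩ : ∃ p ps, PySem.Chars.splitOn s.toList sep.toList = p :: ps := by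
    have h := go_cur sep.toList (s.toList.length + 1) s.toList []
    exact ⟨_, _, by simpa [PySem.Chars.splitOn] using h⟩
  rw [scan_eq_fold sep.toList hsep (s.toList.length + 1) s.toList s.toList.length true 0 0
      (by omega) (le_refl _)]
  have hgo : PySem.Chars.splitOn.go sep.toList (s.toList.length + 1) s.toList [] [] = p :: ps := hq
  rw [hsplit, hgo, hq, if_neg hsep]
  simp only [List.map_cons, List.headD_cons, List.tail_cons]
  have hget : PySem.List.pyGet? (String.ofList p :: ps.map String.ofList) (0 : Int)
      = some (String.ofList p) := by
    simp [PySem.List.pyGet?, PySem.List.pyIdx?]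
  rw [hget]
  have hslice : PySem.List.slice (String.ofList p :: ps.map String.ofList) (some 1) none
      = ps.map String.ofList := by
    rw [PySem.List.slice_from _ (by norm_num : (0:Int) ≤ 1)]
    simp
  rw [hslice]
  simp only [List.foldl_map, pvFin, pvStep, if_pos, PySem.Str.len_eq, String.toList_ofList,
    zero_add]
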